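-- pv_equiv track=rewrite | github.com/thierryxdp/TCC | problems/831/solution_327905.py | lingua_p
-- ===== SOURCE A (Python) =====
-- def lingua_p(s):
--     vog = "aeiou"
--
--     new = ""
--
--     for i in s:
--         i=i.lower()
--         new += i
--
--         if i in vog:
--             new +="p"
--             new+=i
--
--     return new
-- ===== SOURCE B (Python) =====
-- def lingua_p(s):
--     s = s.lower()
--     for v in "aeiou":
--         s = s.replace(v, v + "p" + v)
--     return s
-- ===== Notes on version B (the rewrite author's own statement) =====
-- stated objective: faster
-- what changed: B lowercases once and then performs five staged whole-string rewriting passes (one s.replace per vowel, inserting the extra letter and the vowel copy) instead of A's single Python-level per-character scan that branches and appends inside one loop.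
import Mathlib
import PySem

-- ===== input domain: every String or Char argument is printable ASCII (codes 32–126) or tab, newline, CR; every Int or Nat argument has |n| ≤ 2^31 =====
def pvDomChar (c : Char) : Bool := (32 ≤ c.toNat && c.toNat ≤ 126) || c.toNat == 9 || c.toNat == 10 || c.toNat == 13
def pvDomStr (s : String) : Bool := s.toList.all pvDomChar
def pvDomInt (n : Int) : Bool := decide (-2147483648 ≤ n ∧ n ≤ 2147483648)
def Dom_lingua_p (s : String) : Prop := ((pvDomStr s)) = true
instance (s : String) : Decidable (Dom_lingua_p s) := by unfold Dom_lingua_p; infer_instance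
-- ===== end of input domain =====

-- B lowercases once, then rewrites the string in five staged replace passes (one per vowel) instead of A's single per-character append loop (alternative decomposition).


-- ===== PORT A =====
-- for i in s: i = i.lower(); new += i; if i in vog: new += "p"; new += i
def lingua_p (s : String) : String :=
  let vog := "aeiou".toList
  String.ofList (s.toList.foldl (fun new i =>
    let i := PySem.Chars.lowerChar i
    let new := new ++ [i]
    if PySem.Chars.isIn [i] vog then new ++ ['p'] ++ [i] else new) [])

-- ===== PORT B =====
-- s = s.lower(); for v in "aeiou": s = s.replace(v, v + "p" + v); return s
def lingua_p_alt (s : String) : String :=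
  "aeiou".toList.foldl
    (fun s v => PySem.Str.replace s (String.ofList [v]) (String.ofList [v, 'p', v]))
    (PySem.Str.lower s)

-- ===== PRECONDITION & SPEC =====
def Spec_lingua_p (s : String) (out : String) : Prop := out = lingua_p_alt s
instance (s : String) (out : String) : Decidable (Spec_lingua_p s out) := by unfold Spec_lingua_p; infer_instance

-- ===== CLAIM (what is proved, stated in full; the proofs are below) =====
def Claim_equal_lingua_p : Prop := ∀ (s : String), Dom_lingua_p s → Spec_lingua_p s (lingua_p s)

-- ===== LEMMAS AND PROOFS =====

-- replace with a single-character pattern is a pointwise flatMap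
theorem replace_single_go (v : Char) (r : List Char) :
    ∀ (l acc : List Char) (fuel : Nat), l.length ≤ fuel →
      PySem.Chars.replace.go [v] r fuel l acc
        = acc.reverse ++ l.flatMap (fun c => if c = v then r else [c]) := by
  intro l
  induction l with
  | nil =>
    intro acc fuel _
    cases fuel <;> simp [PySem.Chars.replace.go]
  | cons c t ih =>
    intro acc fuel hf
    cases fuel with
    | zero => simp at hf
    | succ fuel =>
      rw [PySem.Chars.replace.go]
      by_cases hc : c = v
      · subst hc
        simp [List.isPrefixOf, ih (r.reverse ++ acc) fuel (by simpa using hf)]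
      · simp [List.isPrefixOf, hc, Ne.symm hc, ih (c :: acc) fuel (by simpa using hf)]

theorem replace_single (v : Char) (r cs : List Char) :
    PySem.Chars.replace cs [v] r = cs.flatMap (fun c => if c = v then r else [c]) := by
  rw [PySem.Chars.replace]
  simp [replace_single_go v r cs [] cs.length le_rfl]

-- the staged replace passes, as one flatMap of the per-character expansion
theorem stages_eq (vs : List Char) :
    ∀ cs : List Char, 'p' ∉ vs → vs.Nodup →
    vs.foldl (fun s v => PySem.Chars.replace s [v] [v, 'p', v]) cs
      = cs.flatMap (fun c => if c ∈ vs then [c, 'p', c] else [c]) := by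
  induction vs with
  | nil => intro cs _ _; simp
  | cons v vs ih =>
    intro cs hp hnd
    have hpvs : 'p' ∉ vs := fun h => hp (List.mem_cons_of_mem _ h)
    have hvvs : v ∉ vs := (List.nodup_cons.mp hnd).1
    simp only [List.foldl_cons]
    rw [replace_single, ih _ hpvs (List.nodup_cons.mp hnd).2, List.flatMap_assoc]
    congr 1
    funext c
    by_cases hc : c = v
    · subst hc; simp [hvvs, hpvs]
    · simp [hc]

-- A's loop, as a flatMap of its per-character contribution
theorem lingua_p_loop (cs : List Char) (acc : List Char) :
    cs.foldl (fun new i =>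
      let i := PySem.Chars.lowerChar i
      let new := new ++ [i]
      if PySem.Chars.isIn [i] "aeiou".toList then new ++ ['p'] ++ [i] else new) acc
    = acc ++ cs.flatMap (fun i =>
        (PySem.Chars.lowerChar i) ::
          (if PySem.Chars.isIn [PySem.Chars.lowerChar i] "aeiou".toList
           then ['p', PySem.Chars.lowerChar i] else [])) := by
  induction cs generalizing acc with
  | nil => simp
  | cons c cs ih =>
    simp only [List.foldl_cons, List.flatMap_cons, ih]
    split <;> simp

theorem isIn_single (c : Char) (l : List Char) :
    PySem.Chars.isIn [c] l = l.contains c := by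
  by_cases h : c ∈ l
  · rw [List.contains_iff_mem.mpr h, PySem.Chars.isIn_iff_infix]
    obtain ⟨a, b, rfl⟩ := List.append_of_mem h
    exact ⟨a, b, by simp⟩
  · have hf : PySem.Chars.isIn [c] l = false :=
      (PySem.Chars.isIn_eq_false_iff _ _).mpr (fun hinf => h (hinf.subset (List.mem_singleton_self c)))
    simp [hf, h]

-- the String-level fold of B is the Chars-level fold
theorem alt_fold_str (vs : List Char) :
    ∀ cs : List Char,
    vs.foldl (fun s v => PySem.Str.replace s (String.ofList [v]) (String.ofList [v, 'p', v]))
        (String.ofList cs)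
      = String.ofList (vs.foldl (fun s v => PySem.Chars.replace s [v] [v, 'p', v]) cs) := by
  induction vs with
  | nil => intro cs; rfl
  | cons v vs ih =>
    intro cs
    rw [List.foldl_cons, show PySem.Str.replace (String.ofList cs) (String.ofList [v])
        (String.ofList [v, 'p', v]) = String.ofList (PySem.Chars.replace cs [v] [v, 'p', v]) from by
      simp [PySem.Str.replace]]
    exact ih _

-- ===== VERDICT (by name: the statement is the Claim_ definition above) =====
theorem lingua_p_spec : Claim_equal_lingua_p := by
  intro s _
  show _ = _
  simp only [lingua_p, lingua_p_alt]
  rw [lingua_p_loop, List.nil_append]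
  rw [show PySem.Str.lower s = String.ofList (PySem.Chars.lower s.toList) from by
    rw [← PySem.Str.toList_lower, String.ofList_toList]]
  rw [alt_fold_str, stages_eq _ _ (by decide) (by decide)]
  congr 1
  rw [PySem.Chars.lower, List.flatMap_map]
  apply List.flatMap_congr
  intro c _
  simp only [isIn_single, List.contains_eq_mem, decide_eq_true_eq]
  split <;> rfl
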